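-- pv_equiv track=rewrite | github.com/Durgaprasadkudupudi/Python500 | Acc109.py | func
-- ===== SOURCE A (Python) =====
-- def func(arr, mid, k):
--     count = 0   # count of current streak of valid (>= mid)
--     b = 0  # how many valid groups formed
--
--     for i in arr:
--         if i <= mid:
--             count += 1
--             if count == k:
--                 b += 1
--                 count = 0  # reset to avoid overlapping
--         else:
--             count = 0  # break streak if element < mid
--     return b
-- ===== SOURCE B (Python) =====
-- def func(arr, mid, k):
--     if k <= 0:
--         return 0  # A never completes a group of non-positive size
--     mask = "".join("v" if x <= mid else " " for x in arr)
--     return sum(len(run) // k for run in mask.split())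
-- ===== Notes on version B (the rewrite author's own statement) =====
-- stated objective: alternative
-- what changed: B builds a whitespace-masked string ('v' per valid element, space per invalid), splits it into maximal valid runs with str.split(), and sums len(run)//k — no streak counter is maintained; k<=0 returns 0 up front since no group can be completed.
import Mathlib
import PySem

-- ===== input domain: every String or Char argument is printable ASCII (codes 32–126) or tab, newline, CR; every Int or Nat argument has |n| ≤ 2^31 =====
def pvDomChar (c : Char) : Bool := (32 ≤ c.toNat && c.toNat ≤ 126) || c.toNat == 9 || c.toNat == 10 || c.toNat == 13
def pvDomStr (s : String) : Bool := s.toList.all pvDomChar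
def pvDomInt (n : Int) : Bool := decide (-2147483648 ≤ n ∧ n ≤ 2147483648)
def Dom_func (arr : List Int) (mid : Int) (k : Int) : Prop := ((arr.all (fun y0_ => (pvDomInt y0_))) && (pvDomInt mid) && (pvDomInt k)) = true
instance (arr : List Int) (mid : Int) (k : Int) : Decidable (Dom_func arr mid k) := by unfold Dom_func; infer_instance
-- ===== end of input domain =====

-- B replaces A's streak counter by masking the array into a string ('v' = valid, ' ' = invalid),
-- splitting it into maximal valid runs with str.split(), and summing len(run)//k; objective: alternative.


-- ===== PORT A =====
-- A's loop body: count += 1 on a valid element, reset to 0 when it reaches k (b += 1) or on an invalid element.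
def stepA (mid k : Int) (st : Int × Int) (i : Int) : Int × Int :=
  if i ≤ mid then
    if st.1 + 1 = k then (0, st.2 + 1) else (st.1 + 1, st.2)
  else (0, st.2)

def func (arr : List Int) (mid : Int) (k : Int) : Int :=
  (arr.foldl (stepA mid k) (0, 0)).2

-- ===== PORT B =====
-- "v" if x <= mid else " " — the character the mask generator yields per element.
def maskCh (mid : Int) (x : Int) : Char := if x ≤ mid then 'v' else ' '

-- mask = "".join(...): joining one-character strings is exactly the string of the character list.
def func_alt (arr : List Int) (mid : Int) (k : Int) : Int :=
  if k ≤ 0 then 0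
  else
    let mask : String := String.ofList (arr.map (maskCh mid))
    ((PySem.Str.split₀ mask).map (fun run => PySem.Int.floordiv (PySem.Str.len run) k)).sum

-- ===== PRECONDITION & SPEC =====
def Spec_func (arr : List Int) (mid : Int) (k : Int) (out : Int) : Prop := out = func_alt arr mid k
instance (arr : List Int) (mid : Int) (k : Int) (out : Int) : Decidable (Spec_func arr mid k out) := by unfold Spec_func; infer_instance

-- ===== CLAIM (what is proved, stated in full; the proofs are below) =====
def Claim_equal_func : Prop := ∀ (arr : List Int) (mid : Int) (k : Int), Dom_func arr mid k → Spec_func arr mid k (func arr mid k)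

-- ===== LEMMAS AND PROOFS =====

-- With k ≤ 0, A's counter (kept ≥ 0) never equals k after an increment, so b stays at its start value.
theorem foldA_nonpos (mid k : Int) (hk : k ≤ 0) :
    ∀ (arr : List Int) (c b : Int), 0 ≤ c →
      (arr.foldl (stepA mid k) (c, b)).2 = b := by
  intro arr
  induction arr with
  | nil => intro c b _; rfl
  | cons x t ih =>
    intro c b hc
    simp only [List.foldl, stepA]
    by_cases hx : x ≤ mid
    · have hne : ¬ (c + 1 = k) := by omega
      simp only [hx, if_pos, hne, if_false]
      exact ih (c + 1) b (by omega)
    · simp only [hx, if_false]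
      exact ih 0 b le_rfl

-- Proof-side intermediate loop: raw run length plus total of completed runs' groups.
def stepB (mid k : Int) (st : Int × Int) (x : Int) : Int × Int :=
  if x ≤ mid then (st.1 + 1, st.2) else (0, st.2 + PySem.Int.floordiv st.1 k)

-- Core invariant for 0 < k: A's state is the current run length reduced mod k (c) with the
-- completed groups already in b; stepB's state is the raw run length q*k + c with only previous
-- runs' groups in its total.
theorem core (mid k : Int) (hk : 0 < k) :
    ∀ (arr : List Int) (c q b t : Int), 0 ≤ c → c < k → 0 ≤ q →
      (arr.foldl (stepB mid k) (q * k + c, t)).2 +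
        PySem.Int.floordiv (arr.foldl (stepB mid k) (q * k + c, t)).1 k
      = t + q - b + (arr.foldl (stepA mid k) (c, b)).2 := by
  intro arr
  induction arr with
  | nil =>
    intro c q b t hc hck hq
    simp only [List.foldl]
    rw [PySem.Int.floordiv_eq_ediv_of_pos hk]
    have h1 : (q * k + c) / k = q + c / k := by
      rw [add_comm (q * k) c, Int.add_mul_ediv_right c q (by omega : k ≠ 0)]
      ring
    have h2 : c / k = 0 := Int.ediv_eq_zero_of_lt hc hck
    rw [h1, h2]; ring
  | cons x tl ih =>
    intro c q b t hc hck hq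
    simp only [List.foldl, stepA, stepB]
    by_cases hx : x ≤ mid
    · simp only [hx, if_pos]
      by_cases hfull : c + 1 = k
      · have hB : q * k + c + 1 = (q + 1) * k + 0 := by
          rw [add_mul, one_mul]; omega
        simp only [hfull, if_pos, hB]
        have := ih 0 (q + 1) (b + 1) t le_rfl hk (by omega)
        rw [this]; ring
      · have hck' : c + 1 < k := by omega
        simp only [hfull, if_false]
        have hB : q * k + c + 1 = q * k + (c + 1) := by ring
        rw [hB]
        exact ih (c + 1) q b t (by omega) hck' hq
    · simp only [hx, if_false]
      rw [PySem.Int.floordiv_eq_ediv_of_pos hk]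
      have h1 : (q * k + c) / k = q := by
        rw [add_comm (q * k) c, Int.add_mul_ediv_right c q (by omega : k ≠ 0),
            Int.ediv_eq_zero_of_lt hc hck]; ring
      rw [h1]
      have := ih 0 0 b (t + q) le_rfl hk le_rfl
      simp only [zero_mul, zero_add] at this
      rw [this]; ring

-- Abbreviation for the per-run contribution summed by B.
def runSum (k : Int) (rs : List (List Char)) : Int :=
  (rs.map (fun r => PySem.Int.floordiv ((r.length : Int)) k)).sum

theorem runSum_reverse (k : Int) (rs : List (List Char)) : runSum k rs.reverse = runSum k rs := by
  simp [runSum, List.sum_reverse]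

-- split₀.go on the mask of arr, with current word cur and emitted words acc, sums to the
-- stepB fold of arr started at run length |cur| (total t subtracted back out).
theorem go_sum (mid k : Int) (hk : 0 < k) :
    ∀ (arr : List Int) (cur : List Char) (acc : List (List Char)) (t : Int),
      runSum k (PySem.Chars.split₀.go (arr.map (maskCh mid)) cur acc)
      = runSum k acc - t +
        ((arr.foldl (stepB mid k) ((cur.length : Int), t)).2 +
          PySem.Int.floordiv (arr.foldl (stepB mid k) ((cur.length : Int), t)).1 k) := by
  intro arr
  induction arr with
  | nil =>
    intro cur acc t
    simp only [List.map, List.foldl, PySem.Chars.split₀.go]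
    cases cur with
    | nil =>
      simp [runSum_reverse, PySem.Int.floordiv_eq_ediv_of_pos hk]
    | cons c cs =>
      simp only [List.isEmpty_cons, Bool.false_eq_true, if_false, runSum_reverse]
      simp [runSum]
      ring
  | cons x tl ih =>
    intro cur acc t
    simp only [List.map, List.foldl]
    by_cases hx : x ≤ mid
    · have hch : maskCh mid x = 'v' := by simp [maskCh, hx]
      have hsp : PySem.Chars.isspace 'v' = false := by decide
      rw [hch]
      simp only [PySem.Chars.split₀.go, hsp, Bool.false_eq_true, if_false]
      have := ih ('v' :: cur) acc t
      simp only [List.length_cons] at this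
      rw [this]
      have hlen : (((cur.length + 1 : Nat)) : Int) = (cur.length : Int) + 1 := by push_cast; ring
      simp only [stepB, hx, if_pos, hlen]
    · have hch : maskCh mid x = ' ' := by simp [maskCh, hx]
      have hsp : PySem.Chars.isspace ' ' = true := by decide
      rw [hch]
      simp only [PySem.Chars.split₀.go, hsp, if_pos]
      have hstep : stepB mid k ((cur.length : Int), t) x
          = (0, t + PySem.Int.floordiv (cur.length : Int) k) := by
        simp [stepB, hx]
      rw [hstep]
      cases cur with
      | nil =>
        simp only [List.isEmpty_nil, if_pos]
        have := ih [] acc (t + PySem.Int.floordiv ((0:Nat) : Int) k)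
        simp only [List.length_nil] at this ⊢
        rw [this]
        have h0 : PySem.Int.floordiv ((0:Nat) : Int) k = 0 := by
          rw [PySem.Int.floordiv_eq_ediv_of_pos hk]; simp
        simp only [Nat.cast_zero] at h0 ⊢
        rw [h0]; ring
      | cons c cs =>
        simp only [List.isEmpty_cons, Bool.false_eq_true, if_false]
        have := ih [] ((c :: cs).reverse :: acc) (t + PySem.Int.floordiv (((c :: cs).length : Nat) : Int) k)
        simp only [List.length_nil] at this
        rw [this]
        have hacc : runSum k ((c :: cs).reverse :: acc)
            = PySem.Int.floordiv (((c :: cs).length : Nat) : Int) k + runSum k acc := by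
          simp [runSum]
        rw [hacc]; ring

-- ===== VERDICT (by name: the statement is the Claim_ definition above) =====
theorem func_spec : Claim_equal_func := by
  intro arr mid k _
  unfold Spec_func func func_alt
  by_cases hk : k ≤ 0
  · simp only [hk, if_pos]
    exact foldA_nonpos mid k hk arr 0 0 le_rfl
  · have hk' : 0 < k := by omega
    simp only [hk, if_false]
    have hbridge :
        ((PySem.Str.split₀ (String.ofList (arr.map (maskCh mid)))).map
            (fun run => PySem.Int.floordiv (PySem.Str.len run) k)).sum
        = runSum k (PySem.Chars.split₀ (arr.map (maskCh mid))) := by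
      simp [runSum, PySem.Chars.split₀, PySem.Str.split₀, List.map_map,
        Function.comp_def, PySem.Str.len_eq]
    rw [hbridge]
    unfold PySem.Chars.split₀
    have hgo := go_sum mid k hk' arr [] [] 0
    simp only [List.length_nil, Nat.cast_zero] at hgo
    rw [hgo]
    have hcore := core mid k hk' arr 0 0 0 0 le_rfl hk' le_rfl
    simp only [zero_mul, zero_add] at hcore
    simp only [runSum, List.map_nil, List.sum_nil]
    omega
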